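-- pv_equiv track=rewrite | github.com/joshrobertson8/leetcode26 | leetcode_sync.py | categorize_problem
-- ===== SOURCE A (Python) =====
-- from typing import Dict, List, Optional, Tuple
--
-- def categorize_problem(title: str, topic_tags: List[str]) -> str:
--     """
--     Categorize problem using existing repository structure.
--     """
--     title_lower = title.lower()
--     tag_slugs = [tag.lower() for tag in topic_tags]
--
--     # Priority-based category mapping
--     category_mappings = [
--         ("trie", ["trie", "prefix-tree"]),
--         ("design", ["design"]),
--         ("heap", ["heap", "priority-queue", "heap-priority-queue"]),
--         ("graph", ["graph", "depth-first-search", "breadth-first-search"]),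
--         ("tree", ["tree", "binary-tree", "binary-search-tree"]),
--         ("linked-list", ["linked-list"]),
--         ("stack", ["stack", "monotonic-stack"]),
--         ("sliding-window", ["sliding-window"]),
--         ("two-pointers", ["two-pointers"]),
--         ("binary-search", ["binary-search"]),
--         ("backtracking", ["backtracking"]),
--         ("dynamic-programming", ["dynamic-programming"]),
--         ("greedy", ["greedy"]),
--         ("bit-manipulation", ["bit-manipulation"]),
--         ("sorting", ["sorting", "merge-sort", "quick-sort", "bucket-sort"]),
--         ("math", ["math", "number-theory"]),
--         ("hash-table", ["hash-table"]),
--         ("string", ["string"]),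
--         ("array", ["array"]),
--     ]
--
--     for category, tags in category_mappings:
--         for tag in tags:
--             if tag in tag_slugs:
--                 return category
--
--     # Title-based fallback
--     title_patterns = {
--         "string": ["palindrome", "anagram", "substring", "string", "word", "roman"],
--         "array": ["array", "sum", "subarray", "merge", "sort", "remove", "duplicate"],
--         "linked-list": ["linked list", "list node"],
--         "tree": ["tree", "binary tree", "depth", "height", "traversal"],
--         "hash-table": ["hash", "contains duplicate", "two sum"],
--         "dynamic-programming": ["climbing", "house robber", "coin change"],
--         "bit-manipulation": ["bit", "single number", "power of two"],
--         "math": ["power of", "happy number", "perfect square"],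
--         "stack": ["parentheses", "brackets", "valid parentheses"],
--     }
--
--     for category, patterns in title_patterns.items():
--         for pattern in patterns:
--             if pattern in title_lower:
--                 return category
--
--     return "array"
-- ===== SOURCE B (Python) =====
-- from typing import Dict, List, Optional, Tuple
--
-- # Flat priority index: mapping-tag -> (priority rank, category).  Lower rank = higher
-- # priority; ranks follow the order of the original category table.
-- _TAG_RANK: Dict[str, Tuple[int, str]] = {"trie": (0, "trie"), "prefix-tree": (0, "trie"), "design": (1, "design"), "heap": (2, "heap"), "priority-queue": (2, "heap"), "heap-priority-queue": (2, "heap"), "graph": (3, "graph"), "depth-first-search": (3, "graph"), "breadth-first-search": (3, "graph"), "tree": (4, "tree"), "binary-tree": (4, "tree"), "binary-search-tree": (4, "tree"), "linked-list": (5, "linked-list"), "stack": (6, "stack"), "monotonic-stack": (6, "stack"), "sliding-window": (7, "sliding-window"), "two-pointers": (8, "two-pointers"), "binary-search": (9, "binary-search"), "backtracking": (10, "backtracking"), "dynamic-programming": (11, "dynamic-programming"), "greedy": (12, "greedy"), "bit-manipulation": (13, "bit-manipulation"), "sorting": (14, "sorting"), "merge-sort": (14, "sorting"), "quick-sort": (14,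 "sorting"), "bucket-sort": (14, "sorting"), "math": (15, "math"), "number-theory": (15, "math"), "hash-table": (16, "hash-table"), "string": (17, "string"), "array": (18, "array")}
--
-- # Flat (pattern, category) pairs, in the priority order of the original pattern table.
-- _PATTERN_CATEGORY: List[Tuple[str, str]] = [("palindrome", "string"), ("anagram", "string"), ("substring", "string"), ("string", "string"), ("word", "string"), ("roman", "string"), ("array", "array"), ("sum", "array"), ("subarray", "array"), ("merge", "array"), ("sort", "array"), ("remove", "array"), ("duplicate", "array"), ("linked list", "linked-list"), ("list node", "linked-list"), ("tree", "tree"), ("binary tree", "tree"), ("depth", "tree"), ("height", "tree"), ("traversal", "tree"), ("hash", "hash-table"), ("contains duplicate", "hash-table"), ("two sum", "hash-table"), ("climbing", "dynamic-programming"), ("house robber", "dynamic-programming"), ("coin change", "dynamic-programming"), ("bit", "bit-manipulation"), ("single number", "bit-manipulation"), ("power of two", "bit-manipulation"), ("power of", "math"), ("happy number", "math"), ("perfect square", "math"), ("parentheses", "stack"), ("brackets", "stack"), ("valid parentheses", "stack")]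
--
--
-- def categorize_problem(title: str, topic_tags: List[str]) -> str:
--     # Phase 1: one pass over the input tags, keeping the best (lowest-rank) hit,
--     # instead of scanning the 19-category table against the tag list.
--     best = None
--     for tag in topic_tags:
--         hit = _TAG_RANK.get(tag.lower())
--         if hit is not None and (best is None or hit[0] < best[0]):
--             best = hit
--     if best is not None:
--         return best[1]
--     # Phase 2: first title pattern (in priority order) occurring in the title.
--     title_lower = title.lower()
--     for pattern, category in _PATTERN_CATEGORY:
--         if pattern in title_lower:
--             return category
--     return "array"
-- ===== Notes on version B (the rewrite author's own statement) =====
-- stated objective: faster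
-- what changed: Phase 1 is replaced by a single pass over the input tags against a flat precomputed tag -> (rank, category) dictionary, selecting the minimum-rank hit (A instead scans 19 categories x their tags with an inner membership test over the tag list), and the nested title-pattern table is flattened into one (pattern, category) list scanned once.
import Mathlib
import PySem

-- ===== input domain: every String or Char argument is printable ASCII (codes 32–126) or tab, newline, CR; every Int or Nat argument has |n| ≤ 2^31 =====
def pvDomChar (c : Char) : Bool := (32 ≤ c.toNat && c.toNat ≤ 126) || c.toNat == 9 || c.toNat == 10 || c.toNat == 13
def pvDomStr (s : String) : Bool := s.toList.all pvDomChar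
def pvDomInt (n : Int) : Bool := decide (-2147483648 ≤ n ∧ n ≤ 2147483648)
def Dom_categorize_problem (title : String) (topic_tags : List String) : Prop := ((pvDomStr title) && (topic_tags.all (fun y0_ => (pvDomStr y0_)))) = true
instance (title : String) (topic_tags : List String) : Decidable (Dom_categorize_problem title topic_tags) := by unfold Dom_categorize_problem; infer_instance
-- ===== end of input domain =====

-- B replaces A's scan of the 19-category table (inner membership test over the tag list) by a
-- single pass over the input tags against a flat precomputed tag -> (rank, category) dictionary,
-- selecting the minimum-rank hit, and flattens the title-pattern table into one (pattern, category)
-- list scanned once (objective: faster — one dict lookup per input tag instead of a table scan).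

-- ===== PORT A =====
-- A's literal tables (used only by A's port)
def pvCategoryMappings : List (String × List String) := [
    ("trie", ["trie", "prefix-tree"]),
    ("design", ["design"]),
    ("heap", ["heap", "priority-queue", "heap-priority-queue"]),
    ("graph", ["graph", "depth-first-search", "breadth-first-search"]),
    ("tree", ["tree", "binary-tree", "binary-search-tree"]),
    ("linked-list", ["linked-list"]),
    ("stack", ["stack", "monotonic-stack"]),
    ("sliding-window", ["sliding-window"]),
    ("two-pointers", ["two-pointers"]),
    ("binary-search", ["binary-search"]),
    ("backtracking", ["backtracking"]),
    ("dynamic-programming", ["dynamic-programming"]),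
    ("greedy", ["greedy"]),
    ("bit-manipulation", ["bit-manipulation"]),
    ("sorting", ["sorting", "merge-sort", "quick-sort", "bucket-sort"]),
    ("math", ["math", "number-theory"]),
    ("hash-table", ["hash-table"]),
    ("string", ["string"]),
    ("array", ["array"])]

def pvTitlePatterns : List (String × List String) := [
    ("string", ["palindrome", "anagram", "substring", "string", "word", "roman"]),
    ("array", ["array", "sum", "subarray", "merge", "sort", "remove", "duplicate"]),
    ("linked-list", ["linked list", "list node"]),
    ("tree", ["tree", "binary tree", "depth", "height", "traversal"]),
    ("hash-table", ["hash", "contains duplicate", "two sum"]),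
    ("dynamic-programming", ["climbing", "house robber", "coin change"]),
    ("bit-manipulation", ["bit", "single number", "power of two"]),
    ("math", ["power of", "happy number", "perfect square"]),
    ("stack", ["parentheses", "brackets", "valid parentheses"])]

-- A's nested 'for category, xs: for x in xs: if hit: return category' loops
def pvFirstCat (pred : String → Bool) : List (String × List String) → Option String
  | [] => none
  | (c, xs) :: rest => if xs.any pred then some c else pvFirstCat pred rest

def categorize_problem (title : String) (topic_tags : List String) : String :=
  let title_lower := PySem.Str.lower title
  let tag_slugs := topic_tags.map PySem.Str.lower
  match pvFirstCat (fun tag => tag_slugs.contains tag) pvCategoryMappings with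
  | some c => c
  | none =>
    match pvFirstCat (fun pat => PySem.Str.isIn pat title_lower) pvTitlePatterns with
    | some c => c
    | none => "array"

-- ===== PORT B =====
-- _TAG_RANK: the flat literal dict tag -> (rank, category)
def pvTagRank : PySem.Dict String (Int × String) := PySem.Dict.mk [
    ("trie", (0, "trie")),
    ("prefix-tree", (0, "trie")),
    ("design", (1, "design")),
    ("heap", (2, "heap")),
    ("priority-queue", (2, "heap")),
    ("heap-priority-queue", (2, "heap")),
    ("graph", (3, "graph")),
    ("depth-first-search", (3, "graph")),
    ("breadth-first-search", (3, "graph")),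
    ("tree", (4, "tree")),
    ("binary-tree", (4, "tree")),
    ("binary-search-tree", (4, "tree")),
    ("linked-list", (5, "linked-list")),
    ("stack", (6, "stack")),
    ("monotonic-stack", (6, "stack")),
    ("sliding-window", (7, "sliding-window")),
    ("two-pointers", (8, "two-pointers")),
    ("binary-search", (9, "binary-search")),
    ("backtracking", (10, "backtracking")),
    ("dynamic-programming", (11, "dynamic-programming")),
    ("greedy", (12, "greedy")),
    ("bit-manipulation", (13, "bit-manipulation")),
    ("sorting", (14, "sorting")),
    ("merge-sort", (14, "sorting")),
    ("quick-sort", (14, "sorting")),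
    ("bucket-sort", (14, "sorting")),
    ("math", (15, "math")),
    ("number-theory", (15, "math")),
    ("hash-table", (16, "hash-table")),
    ("string", (17, "string")),
    ("array", (18, "array"))]

-- _PATTERN_CATEGORY: the flat literal (pattern, category) list
def pvPatternCategory : List (String × String) := [
    ("palindrome", "string"),
    ("anagram", "string"),
    ("substring", "string"),
    ("string", "string"),
    ("word", "string"),
    ("roman", "string"),
    ("array", "array"),
    ("sum", "array"),
    ("subarray", "array"),
    ("merge", "array"),
    ("sort", "array"),
    ("remove", "array"),
    ("duplicate", "array"),
    ("linked list", "linked-list"),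
    ("list node", "linked-list"),
    ("tree", "tree"),
    ("binary tree", "tree"),
    ("depth", "tree"),
    ("height", "tree"),
    ("traversal", "tree"),
    ("hash", "hash-table"),
    ("contains duplicate", "hash-table"),
    ("two sum", "hash-table"),
    ("climbing", "dynamic-programming"),
    ("house robber", "dynamic-programming"),
    ("coin change", "dynamic-programming"),
    ("bit", "bit-manipulation"),
    ("single number", "bit-manipulation"),
    ("power of two", "bit-manipulation"),
    ("power of", "math"),
    ("happy number", "math"),
    ("perfect square", "math"),
    ("parentheses", "stack"),
    ("brackets", "stack"),
    ("valid parentheses", "stack")]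

def categorize_problem_alt (title : String) (topic_tags : List String) : String :=
  let best := topic_tags.foldl
    (fun best tag =>
      match pvTagRank.get? (PySem.Str.lower tag) with
      | none => best
      | some hit =>
        match best with
        | none => some hit
        | some b => if hit.1 < b.1 then some hit else best)
    none
  match best with
  | some b => b.2
  | none =>
    let title_lower := PySem.Str.lower title
    match pvPatternCategory.find? (fun pc => PySem.Str.isIn pc.1 title_lower) with
    | some pc => pc.2
    | none => "array"

-- ===== PRECONDITION & SPEC =====
def Spec_categorize_problem (title : String) (topic_tags : List String) (out : String) : Prop := out = categorize_problem_alt title topic_tags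
instance (title : String) (topic_tags : List String) (out : String) : Decidable (Spec_categorize_problem title topic_tags out) := by unfold Spec_categorize_problem; infer_instance

-- ===== CLAIM (what is proved, stated in full; the proofs are below) =====
def Claim_equal_categorize_problem : Prop := ∀ (title : String) (topic_tags : List String), Dom_categorize_problem title topic_tags → Spec_categorize_problem title topic_tags (categorize_problem title topic_tags)

-- ===== LEMMAS AND PROOFS =====

-- first-match lookup in A's nested table, ranks starting at i
def pvLookupRank : List (String × List String) → Int → String → Option (Int × String)
  | [], _, _ => none
  | (c, ts) :: rest, i, t => if ts.contains t then some (i, c) else pvLookupRank rest (i+1) t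

-- the flat assoc list that ranks a nested table starting at i
def pvFlatRanks : List (String × List String) → Int → List (String × (Int × String))
  | [], _ => []
  | (c, ts) :: rest, i => ts.map (fun t => (t, (i, c))) ++ pvFlatRanks rest (i+1)

-- B's literal dict is exactly the flat ranking of A's table (both are closed literals)
theorem pvTagRank_eq_mk : pvTagRank = PySem.Dict.mk (pvFlatRanks pvCategoryMappings 0) := rfl

theorem get?_mk_map_append (ts : List String) (v : Int × String)
    (L : List (String × (Int × String))) (t : String) :
    (PySem.Dict.mk (ts.map (fun s => (s, v)) ++ L)).get? t
      = if ts.contains t then some v else (PySem.Dict.mk L).get? t := by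
  induction ts with
  | nil => simp
  | cons s ts ih =>
    simp only [List.map_cons, List.cons_append, PySem.Dict.get?_mk_cons, ih]
    by_cases hst : s = t
    · subst hst; simp
    · simp [hst, Ne.symm hst]

theorem get?_mk_flatRanks (ms : List (String × List String)) :
    ∀ (i : Int) (t : String),
    (PySem.Dict.mk (pvFlatRanks ms i)).get? t = pvLookupRank ms i t := by
  induction ms with
  | nil => intro i t; simp [pvFlatRanks, pvLookupRank, PySem.Dict.get?]
  | cons m rest ih =>
    intro i t
    obtain ⟨c, ts⟩ := m
    rw [pvFlatRanks, pvLookupRank, get?_mk_map_append, ih]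

theorem get?_tagRank (t : String) :
    pvTagRank.get? t = pvLookupRank pvCategoryMappings 0 t := by
  rw [pvTagRank_eq_mk, get?_mk_flatRanks]

theorem lookupRank_le (ms : List (String × List String)) :
    ∀ (i : Int) (t : String) (p : Int × String), pvLookupRank ms i t = some p → i ≤ p.1 := by
  induction ms with
  | nil => intro i t p h; simp [pvLookupRank] at h
  | cons m rest ih =>
    intro i t p h
    obtain ⟨c, ts⟩ := m
    rw [pvLookupRank] at h
    split at h
    · cases Option.some.inj h; simp
    · have := ih (i+1) t p h; omega

theorem lookupRank_head (c : String) (ts : List String) (rest : List (String × List String))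
    (i : Int) (t : String) (p : Int × String)
    (h : pvLookupRank ((c, ts) :: rest) i t = some p) (hp : p.1 = i) : p = (i, c) := by
  rw [pvLookupRank] at h
  split at h
  · exact (Option.some.inj h).symm
  · exfalso; have := lookupRank_le rest (i+1) t p h; omega

-- B's min-selection loop, abstracted over the lookup f
def pvMinStep (f : String → Option (Int × String)) (best : Option (Int × String)) (tag : String) : Option (Int × String) :=
  match f tag with
  | none => best
  | some hit =>
    match best with
    | none => some hit
    | some b => if hit.1 < b.1 then some hit else best

theorem minStep_none (f : String → Option (Int × String)) (acc : Option (Int × String)) (s : String)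
    (h : pvMinStep f acc s = none) : f s = none ∧ acc = none := by
  rw [pvMinStep] at h
  cases hf : f s with
  | none => simp only [hf] at h; exact ⟨rfl, h⟩
  | some hit =>
    exfalso
    simp only [hf] at h
    cases acc with
    | none => simp at h
    | some b => by_cases hlt : hit.1 < b.1 <;> simp [hlt] at h

theorem minFold_none_iff (f : String → Option (Int × String)) (slugs : List String) :
    ∀ acc, slugs.foldl (pvMinStep f) acc = none ↔ acc = none ∧ ∀ t ∈ slugs, f t = none := by
  induction slugs with
  | nil => intro acc; simp
  | cons s slugs ih =>
    intro acc
    rw [List.foldl_cons, ih]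
    constructor
    · rintro ⟨h1, h2⟩
      rw [pvMinStep] at h1
      cases hf : f s with
      | none =>
        simp only [hf] at h1
        exact ⟨h1, by intro t ht; rcases List.mem_cons.mp ht with rfl | ht' <;> [exact hf; exact h2 t ht']⟩
      | some hit =>
        exfalso
        simp only [hf] at h1
        cases acc with
        | none => simp at h1
        | some b => by_cases hlt : hit.1 < b.1 <;> simp [hlt] at h1
    · rintro ⟨h1, h2⟩
      subst h1
      have hf : f s = none := h2 s (by simp)
      exact ⟨by rw [pvMinStep, hf], fun t ht => h2 t (by simp [ht])⟩

theorem minFold_spec (f : String → Option (Int × String)) (slugs : List String) :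
    ∀ acc p, slugs.foldl (pvMinStep f) acc = some p →
      ((∃ t ∈ slugs, f t = some p) ∨ acc = some p) ∧
      (∀ t ∈ slugs, ∀ q, f t = some q → p.1 ≤ q.1) ∧
      (∀ b, acc = some b → p.1 ≤ b.1) := by
  induction slugs with
  | nil =>
    intro acc p h
    have h' : acc = some p := by simpa using h
    refine ⟨Or.inr h', by simp, ?_⟩
    intro b hb
    rw [h'] at hb; cases Option.some.inj hb; exact le_rfl
  | cons s slugs ih =>
    intro acc p h
    rw [List.foldl_cons] at h
    obtain ⟨hmem, hmin, hacc⟩ := ih _ p h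
    have hstep : ∀ b', pvMinStep f acc s = some b' →
        (f s = some b' ∨ acc = some b') ∧ (∀ q, f s = some q → b'.1 ≤ q.1) ∧
        (∀ b, acc = some b → b'.1 ≤ b.1) := by
      intro b' hb'
      rw [pvMinStep] at hb'
      cases hf : f s with
      | none =>
        simp only [hf] at hb'
        refine ⟨Or.inr hb', ?_, ?_⟩
        · intro q hq; simp at hq
        · intro b hb; rw [hb'] at hb; cases Option.some.inj hb; exact le_rfl
      | some hit =>
        simp only [hf] at hb'
        cases hacc' : acc with
        | none =>
          simp only [hacc', Option.some.injEq] at hb'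
          subst hb'
          refine ⟨Or.inl rfl, ?_, ?_⟩
          · intro q hq; cases Option.some.inj hq; exact le_rfl
          · intro b hb; simp at hb
        | some b =>
          simp only [hacc'] at hb'
          by_cases hlt : hit.1 < b.1
          · rw [if_pos hlt] at hb'
            cases Option.some.inj hb'
            refine ⟨Or.inl rfl, ?_, ?_⟩
            · intro q hq; cases Option.some.inj hq; exact le_rfl
            · intro b0 hb0; cases Option.some.inj hb0; omega
          · rw [if_neg hlt] at hb'
            cases Option.some.inj hb'
            refine ⟨Or.inr rfl, ?_, ?_⟩
            · intro q hq; cases Option.some.inj hq; omega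
            · intro b0 hb0; cases Option.some.inj hb0; exact le_rfl
    constructor
    · rcases hmem with h1 | h1
      · obtain ⟨t, ht, hft⟩ := h1; exact Or.inl ⟨t, by simp [ht], hft⟩
      · rcases (hstep p h1).1 with h2 | h2
        · exact Or.inl ⟨s, by simp, h2⟩
        · exact Or.inr h2
    constructor
    · intro t ht q hq
      rcases List.mem_cons.mp ht with rfl | ht'
      · cases hst : pvMinStep f acc t with
        | none =>
          obtain ⟨hfn, -⟩ := minStep_none f acc t hst
          rw [hfn] at hq; simp at hq
        | some b' =>
          have := (hstep b' hst).2.1 q hq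
          have := hacc b' (by rw [hst])
          omega
      · exact hmin t ht' q hq
    · intro b hb
      cases hst : pvMinStep f acc s with
      | none =>
        obtain ⟨-, han⟩ := minStep_none f acc s hst
        rw [han] at hb; simp at hb
      | some b' =>
        have h1 := hacc b' (by rw [hst])
        have h2 := (hstep b' hst).2.2 b hb
        omega

-- MAIN phase-1 lemma: B's min-rank fold equals A's first-match scan, for any table
theorem phase1_eq (ms : List (String × List String)) :
    ∀ (i : Int) (slugs : List String),
    (match slugs.foldl (pvMinStep (fun t => pvLookupRank ms i t)) none with
     | some p => some p.2
     | none => (none : Option String))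
      = pvFirstCat (fun tag => slugs.contains tag) ms := by
  induction ms with
  | nil =>
    intro i slugs
    have : slugs.foldl (pvMinStep (fun t => pvLookupRank [] i t)) none = none := by
      rw [minFold_none_iff]; exact ⟨rfl, fun t _ => rfl⟩
    rw [this, pvFirstCat]
  | cons m rest ih =>
    intro i slugs
    obtain ⟨c, ts⟩ := m
    rw [pvFirstCat]
    by_cases h : ts.any (fun u => slugs.contains u) = true
    · simp only [h, if_true]
      obtain ⟨u, hu, hus⟩ := List.any_eq_true.mp h
      have hus' : u ∈ slugs := List.contains_iff_mem.mp hus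
      have hfu : pvLookupRank ((c, ts) :: rest) i u = some (i, c) := by
        rw [pvLookupRank, if_pos (List.contains_iff_mem.mpr hu)]
      cases hres : slugs.foldl (pvMinStep (fun t => pvLookupRank ((c, ts) :: rest) i t)) none with
      | none =>
        rw [minFold_none_iff] at hres
        exact absurd (hres.2 u hus') (by rw [hfu]; simp)
      | some p =>
        obtain ⟨hmem, hmin, -⟩ := minFold_spec _ slugs none p hres
        have hple : p.1 ≤ i := hmin u hus' (i, c) hfu
        have hige : i ≤ p.1 := by
          rcases hmem with ⟨t, -, hft⟩ | habs
          · exact lookupRank_le _ i t p hft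
          · simp at habs
        have hpc : p = (i, c) := by
          rcases hmem with ⟨t, -, hft⟩ | habs
          · exact lookupRank_head c ts rest i t p hft (by omega)
          · simp at habs
        rw [hpc]
    · have hnone : ∀ t ∈ slugs, pvLookupRank ((c, ts) :: rest) i t = pvLookupRank rest (i+1) t := by
        intro t htmem
        have hnc : ts.contains t = false := by
          by_contra hcon
          exact h (List.any_eq_true.mpr ⟨t, List.contains_iff_mem.mp (by simpa using hcon),
            List.contains_iff_mem.mpr htmem⟩)
        have hmem' : t ∉ ts := by simpa using hnc
        rw [pvLookupRank, if_neg (by simp [hmem'])]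
      have hfold : slugs.foldl (pvMinStep (fun t => pvLookupRank ((c, ts) :: rest) i t)) none
          = slugs.foldl (pvMinStep (fun t => pvLookupRank rest (i+1) t)) none := by
        apply PySem.List.foldl_congr_mem
        intro acc x hx
        rw [pvMinStep, pvMinStep, hnone x hx]
      rw [hfold, ih (i+1) slugs, if_neg h]

-- phase 2: A's nested scan of the pattern table equals B's scan of a flattened list
theorem phase2_eq (pats : List (String × List String)) (pred : String → Bool) :
    pvFirstCat pred pats
      = ((pats.flatMap (fun cp => cp.2.map (fun p => (p, cp.1)))).find?
          (fun pc => pred pc.1)).map (·.2) := by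
  induction pats with
  | nil => rw [pvFirstCat]; simp
  | cons m rest ih =>
    obtain ⟨c, ps⟩ := m
    rw [pvFirstCat]
    simp only [List.flatMap_cons, List.find?_append]
    have hmap : (ps.map (fun p => (p, c))).find? (fun pc => pred pc.1)
        = (ps.find? pred).map (fun p => (p, c)) := by
      rw [List.find?_map]; rfl
    by_cases h : ps.any pred = true
    · rw [if_pos h]
      have hs : (ps.find? pred).isSome = true :=
        List.find?_isSome.mpr (by simpa [List.any_eq_true] using h)
      obtain ⟨p₀, hp₀⟩ := Option.isSome_iff_exists.mp hs
      rw [hmap, hp₀]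
      rfl
    · have hfind : ps.find? pred = none := List.find?_eq_none.mpr (by
        simp only [List.any_eq_true, not_exists] at h
        intro x hx
        simp at h
        simp [h x hx])
      rw [if_neg h, ih, hmap, hfind]
      rfl

-- B's flat pattern list is exactly the flattening of A's pattern table (closed literals)
theorem pvPatternCategory_eq :
    pvPatternCategory = pvTitlePatterns.flatMap (fun cp => cp.2.map (fun p => (p, cp.1))) := rfl

-- A = B on every input
theorem categorize_problem_eq_alt (title : String) (topic_tags : List String) :
    categorize_problem title topic_tags = categorize_problem_alt title topic_tags := by
  simp only [categorize_problem, categorize_problem_alt]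
  have hfold : topic_tags.foldl
      (fun best tag =>
        match pvTagRank.get? (PySem.Str.lower tag) with
        | none => best
        | some hit =>
          match best with
          | none => some hit
          | some b => if hit.1 < b.1 then some hit else best) none
      = (topic_tags.map PySem.Str.lower).foldl
          (pvMinStep (fun t => pvLookupRank pvCategoryMappings 0 t)) none := by
    rw [List.foldl_map]
    apply PySem.List.foldl_congr_mem
    intro acc x _
    rw [pvMinStep, get?_tagRank]
  rw [hfold]
  have hP1 := phase1_eq pvCategoryMappings 0 (topic_tags.map PySem.Str.lower)
  cases hres : (topic_tags.map PySem.Str.lower).foldl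
      (pvMinStep (fun t => pvLookupRank pvCategoryMappings 0 t)) none with
  | some p =>
    rw [hres] at hP1
    rw [← hP1]
  | none =>
    rw [hres] at hP1
    rw [← hP1]
    have hP2 := phase2_eq pvTitlePatterns (fun pat => PySem.Str.isIn pat (PySem.Str.lower title))
    rw [hP2, ← pvPatternCategory_eq]
    cases pvPatternCategory.find? (fun pc => PySem.Str.isIn pc.1 (PySem.Str.lower title)) with
    | some pc => rfl
    | none => rfl

-- ===== VERDICT (by name: the statement is the Claim_ definition above) =====
theorem categorize_problem_spec : Claim_equal_categorize_problem := by
  intro title topic_tags _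
  unfold Spec_categorize_problem
  exact categorize_problem_eq_alt title topic_tags
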